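-- pv_equiv track=rewrite | github.com/Concentration-point/feishu-multi-agent | tests/test_ask_human_interactive_live.py | _match_choice
-- ===== SOURCE A (Python) =====
-- def _match_choice(text: str, choices: list[str]) -> str | None:
--     """将用户回复文本匹配到选项，返回选项文字或 None。"""
--     stripped = text.strip()
--
--     # 数字匹配：1 / 2 / 3
--     if stripped.isdigit():
--         idx = int(stripped) - 1
--         if 0 <= idx < len(choices):
--             return choices[idx]
--
--     # 完整文本匹配（大小写不敏感）
--     lower = stripped.lower()
--     for c in choices:
--         if c.lower() == lower:
--             return c
--
--     # 包含匹配（兜底）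
--     for c in choices:
--         if c.lower() in lower:
--             return c
--
--     return None
-- ===== SOURCE B (Python) =====
-- def _best_ranked(lower: str, choices: list[str]) -> str | None:
--     """Score every choice (0 = exact, 1 = containment, 2 = no match) and keep the
--     lexicographically smallest (rank, index) candidate among ranks < 2."""
--     best = None  # (rank, index)
--     for i, c in enumerate(choices):
--         cl = c.lower()
--         rank = 0 if cl == lower else (1 if cl in lower else 2)
--         if rank < 2 and (best is None or rank < best[0]):
--             best = (rank, i)
--     return choices[best[1]] if best is not None else None
--
--
-- def _match_choice(text: str, choices: list[str]) -> str | None: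
--     stripped = text.strip()
--     if stripped.isdigit():
--         idx = int(stripped) - 1
--         if 0 <= idx < len(choices):
--             return choices[idx]
--     return _best_ranked(stripped.lower(), choices)
-- ===== Notes on version B (the rewrite author's own statement) =====
-- stated objective: alternative
-- what changed: A's two ordered scans (exact pass, then containment pass) are replaced by a ranking scan: each choice gets a score (0 exact, 1 containment, 2 none) and one enumerate loop keeps the lexicographically smallest (rank, index) candidate, which is looked up at the end.
import Mathlib
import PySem

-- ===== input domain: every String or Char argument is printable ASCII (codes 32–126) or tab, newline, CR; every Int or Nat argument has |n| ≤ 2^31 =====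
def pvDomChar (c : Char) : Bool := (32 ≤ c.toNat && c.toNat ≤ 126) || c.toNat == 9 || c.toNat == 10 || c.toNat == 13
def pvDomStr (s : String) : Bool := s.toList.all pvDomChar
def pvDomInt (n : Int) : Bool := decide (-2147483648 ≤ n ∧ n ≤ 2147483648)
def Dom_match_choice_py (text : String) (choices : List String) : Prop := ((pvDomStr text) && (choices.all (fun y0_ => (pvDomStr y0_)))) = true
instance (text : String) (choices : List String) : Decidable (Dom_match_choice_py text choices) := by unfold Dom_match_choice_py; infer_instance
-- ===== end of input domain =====

-- B replaces A's two ordered scans (exact pass, then containment pass) by a ranking scan: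
-- every choice is scored (0 exact, 1 containment, 2 none) and one enumerated loop keeps the
-- lexicographically smallest (rank, index) candidate; alternative decomposition, no speed claim.

-- ===== PORT A =====
-- `int(stripped)` is ported as `(PySem.Int.ofStr? stripped).getD 0`: it is only reached when
-- `strIsdigit stripped` holds, where ofStr? is always `some` (exact on the ASCII domain).
def match_choice_py (text : String) (choices : List String) : Option String :=
  let stripped := PySem.Str.strip text
  let idx : Int := (PySem.Int.ofStr? stripped).getD 0 - 1
  if PySem.Str.strIsdigit stripped ∧ 0 ≤ idx ∧ idx < (choices.length : Int) then
    PySem.List.pyGet? choices idx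
  else
    let lower := PySem.Str.lower stripped
    match choices.find? (fun c => PySem.Str.lower c == lower) with
    | some c => some c
    | none => choices.find? (fun c => PySem.Str.isIn (PySem.Str.lower c) lower)

-- ===== PORT B =====
-- the enumerate loop of _best_ranked, as structural recursion carrying (index, best)
def bestRankedScan (lower : String) : List String → Nat → Option (Nat × Nat) → Option (Nat × Nat)
  | [], _, best => best
  | c :: rest, i, best =>
    let cl := PySem.Str.lower c
    let rank : Nat := if cl == lower then 0 else if PySem.Str.isIn cl lower then 1 else 2
    let keep : Bool := match best with
      | none => decide (rank < 2)
      | some (r, _) => decide (rank < 2) && decide (rank < r)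
    bestRankedScan lower rest (i + 1) (if keep then some (rank, i) else best)

def bestRanked (lower : String) (choices : List String) : Option String :=
  match bestRankedScan lower choices 0 none with
  | some (_, j) => PySem.List.pyGet? choices (j : Int)
  | none => none

-- same exactness note for `int(stripped)` as in port A
def match_choice_py_alt (text : String) (choices : List String) : Option String :=
  let stripped := PySem.Str.strip text
  if PySem.Str.strIsdigit stripped then
    let idx : Int := (PySem.Int.ofStr? stripped).getD 0 - 1
    if 0 ≤ idx ∧ idx < (choices.length : Int) then
      PySem.List.pyGet? choices idx
    else bestRanked (PySem.Str.lower stripped) choices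
  else bestRanked (PySem.Str.lower stripped) choices

-- ===== PRECONDITION & SPEC =====
def Spec_match_choice_py (text : String) (choices : List String) (out : Option String) : Prop := out = match_choice_py_alt text choices
instance (text : String) (choices : List String) (out : Option String) : Decidable (Spec_match_choice_py text choices out) := by unfold Spec_match_choice_py; infer_instance

-- ===== CLAIM (what is proved, stated in full; the proofs are below) =====
def Claim_equal_match_choice_py : Prop := ∀ (text : String) (choices : List String), Dom_match_choice_py text choices → Spec_match_choice_py text choices (match_choice_py text choices)

-- ===== LEMMAS AND PROOFS =====

-- what the ranking scan computes, as a function of the accumulator and the two first-hit indices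
def scanSpec (p q : List String → Nat → Option Nat) (cs : List String) (i : Nat) :
    Option (Nat × Nat) → Option (Nat × Nat)
  | some (0, j) => some (0, j)
  | some (r, j) =>
      match p cs i with
      | some k => some (0, k)
      | none => some (r, j)
  | none =>
      match p cs i with
      | some k => some (0, k)
      | none =>
        match q cs i with
        | some k => some (1, k)
        | none => none

def fIdx (p : String → Bool) (cs : List String) (i : Nat) : Option Nat :=
  (cs.findIdx? p).map (i + ·)

theorem fIdx_cons (p : String → Bool) (c : String) (cs : List String) (i : Nat) :
    fIdx p (c :: cs) i = if p c then some i else fIdx p cs (i + 1) := by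
  by_cases h : p c
  · simp [fIdx, List.findIdx?_cons, h]
  · cases hf : List.findIdx? p cs <;>
      simp [fIdx, List.findIdx?_cons, h, hf] <;> omega

theorem bestRankedScan_spec (lower : String) (cs : List String) (i : Nat)
    (best : Option (Nat × Nat)) (hb : ∀ r j, best = some (r, j) → r < 2) :
    bestRankedScan lower cs i best =
      scanSpec (fIdx (fun c => PySem.Str.lower c == lower))
               (fIdx (fun c => PySem.Str.isIn (PySem.Str.lower c) lower)) cs i best := by
  induction cs generalizing i best with
  | nil =>
    match best with
    | none => simp [bestRankedScan, scanSpec, fIdx]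
    | some (r, j) =>
      have hr := hb r j rfl
      interval_cases r <;> simp [bestRankedScan, scanSpec, fIdx]
  | cons c rest ih =>
    simp only [bestRankedScan]
    by_cases hex : (PySem.Str.lower c == lower) = true
    · match best with
      | none =>
        rw [ih _ _ (by intro r j h; simp [hex] at h; omega)]
        simp [scanSpec, fIdx_cons, hex]
      | some (r, j) =>
        have hr := hb r j rfl
        interval_cases r
        · rw [ih _ _ (by intro r j h; simp [hex] at h; omega)]
          simp [scanSpec, hex]
        · rw [ih _ _ (by intro r j h; simp [hex] at h; omega)]
          simp [scanSpec, fIdx_cons, hex]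
    · by_cases hct : (PySem.Str.isIn (PySem.Str.lower c) lower) = true
      · have hctC : PySem.Chars.isIn (PySem.Chars.lower c.toList) lower.toList = true := by
          simpa using hct
        match best with
        | none =>
          rw [ih _ _ (by intro r j h; simp [hex, hct, hctC] at h; omega)]
          simp [scanSpec, fIdx_cons, hex, hct, hctC]
        | some (r, j) =>
          have hr := hb r j rfl
          interval_cases r
          · rw [ih _ _ (by intro r j h; simp [hex, hct, hctC] at h; omega)]
            simp [scanSpec, hex, hct, hctC]
          · rw [ih _ _ (by intro r j h; simp [hex, hct, hctC] at h; omega)]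
            simp [scanSpec, fIdx_cons, hex, hct, hctC]
      · have hctC : PySem.Chars.isIn (PySem.Chars.lower c.toList) lower.toList = false := by
          simpa using hct
        match best with
        | none =>
          rw [ih _ _ (by intro r j h; simp [hex, hct, hctC] at h)]
          simp [scanSpec, fIdx_cons, hex, hct, hctC]
        | some (r, j) =>
          have hr := hb r j rfl
          interval_cases r
          · rw [ih _ _ (by intro r j h; simp [hex, hct, hctC] at h; omega)]
            simp [scanSpec, hex, hct, hctC]
          · rw [ih _ _ (by intro r j h; simp [hex, hct, hctC] at h; omega)]
            simp [scanSpec, fIdx_cons, hex, hct, hctC]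

theorem get_of_findIdx? {p : String → Bool} {cs : List String} {j : Nat}
    (h : cs.findIdx? p = some j) : cs[j]? = cs.find? p ∧ j < cs.length := by
  induction cs generalizing j with
  | nil => simp at h
  | cons c rest ih =>
    rw [List.findIdx?_cons] at h
    by_cases hp : p c = true
    · simp [hp] at h; subst h; simp [hp]
    · simp [hp] at h
      obtain ⟨j', hj', rfl⟩ := h
      have := ih hj'
      simp [hp, this.1]
      omega

-- the ranking scan started empty computes A's two ordered find?s
theorem bestRanked_eq (lower : String) (choices : List String) :
    bestRanked lower choices =
      match choices.find? (fun c => PySem.Str.lower c == lower) with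
      | some c => some c
      | none => choices.find? (fun c => PySem.Str.isIn (PySem.Str.lower c) lower) := by
  unfold bestRanked
  rw [bestRankedScan_spec _ _ _ _ (by intro r j h; simp at h)]
  cases hf : choices.findIdx? (fun c => PySem.Str.lower c == lower) with
  | some k =>
    obtain ⟨heq, hlt⟩ := get_of_findIdx? hf
    cases hfind : choices.find? (fun c => PySem.Str.lower c == lower) with
    | none => rw [hfind, List.getElem?_eq_getElem hlt] at heq; simp at heq
    | some c => simp [scanSpec, fIdx, hf, PySem.List.pyGet?_natCast, heq, hfind]
  | none =>
    have h1 : choices.find? (fun c => PySem.Str.lower c == lower) = none := by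
      rw [List.find?_eq_none]; intro c hc
      by_contra hp
      have := List.findIdx?_eq_none_iff.mp hf
      simp at this hp
      exact absurd (this c hc) (by simp [hp])
    cases hg : choices.findIdx? (fun c => PySem.Str.isIn (PySem.Str.lower c) lower) with
    | some k =>
      obtain ⟨heq, hlt⟩ := get_of_findIdx? hg
      have hg' : List.findIdx? (fun c => PySem.Chars.isIn (PySem.Chars.lower c.toList) lower.toList) choices = some k := by
        simpa using hg
      have heq' : choices[k]? = List.find? (fun c => PySem.Chars.isIn (PySem.Chars.lower c.toList) lower.toList) choices := by
        simpa using heq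
      simp [scanSpec, fIdx, hf, hg', h1, PySem.List.pyGet?_natCast, heq']
    | none =>
      have h2 : choices.find? (fun c => PySem.Str.isIn (PySem.Str.lower c) lower) = none := by
        rw [List.find?_eq_none]; intro c hc
        by_contra hp
        have := List.findIdx?_eq_none_iff.mp hg
        simp at this hp
        exact absurd (this c hc) (by simp [hp])
      have h2' : List.find? (fun c => PySem.Chars.isIn (PySem.Chars.lower c.toList) lower.toList) choices = none := by
        simpa using h2
      have hg' : List.findIdx? (fun c => PySem.Chars.isIn (PySem.Chars.lower c.toList) lower.toList) choices = none := by
        simpa using hg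
      simp [scanSpec, fIdx, hf, hg', h1, h2']
theorem if_split {α : Type} (p q : Prop) [Decidable p] [Decidable q] (x y : α) :
    (if p ∧ q then x else y) = (if p then (if q then x else y) else y) := by
  split_ifs <;> tauto

theorem match_choice_py_spec : Claim_equal_match_choice_py := by
  intro text choices _
  unfold Spec_match_choice_py match_choice_py match_choice_py_alt
  simp only [bestRanked_eq]
  exact if_split _ _ _ _
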